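-- pv_equiv track=rewrite | github.com/ThibaultCourtois/Internship-2023-2024 | Gcode_Parser/WASP_Gcode.py | sort_command_parameters
-- ===== SOURCE A (Python) =====
-- def sort_command_parameters(sequence):
--     sorted_sequence = []
--     for command in sequence:
--         parts = command.split()
--         params = {"X": None, "Y": None, "Z": None, "E": None, "F": None}
--         if any(part.startswith("G") for part in parts):
--             for part in parts:
--                 if part.startswith("X"):
--                     params["X"] = part
--                 elif part.startswith("Y"):
--                     params["Y"] = part
--                 elif part.startswith("Z"):
--                     params["Z"] = part
--                 elif part.startswith("E"):
--                     params["E"] = part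
--                 elif part.startswith("F"):
--                     params["F"] = part
--             sorted_command = " ".join([params[param] for param in ["X", "Y", "Z", "E", "F"] if params[param] is not None])
--             sorted_sequence.append(sorted_command)
--         else:
--             parts.remove(parts[-1])
--             sorted_sequence.append(" ".join(parts))
--     return sorted_sequence
-- ===== SOURCE B (Python) =====
-- def sort_command_parameters(sequence):
--     sorted_sequence = []
--     for command in sequence:
--         parts = command.split()
--         if any(part.startswith("G") for part in parts):
--             kept = []
--             for axis in ("X", "Y", "Z", "E", "F"):
--                 last = None
--                 for part in parts:
--                     if part.startswith(axis):
--                         last = part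
--                 if last is not None:
--                     kept.append(last)
--             sorted_sequence.append(" ".join(kept))
--         else:
--             sorted_sequence.append(" ".join(parts[:-1]))
--     return sorted_sequence
-- ===== Notes on version B (the rewrite author's own statement) =====
-- stated objective: simpler
-- what changed: The G-branch drops A's dict entirely: instead of classifying every part into a five-key dict via an elif chain and then reading the dict back in axis order, B loops over the fixed axis order and for each axis keeps the last part starting with that letter; the else branch simply drops the trailing token with parts[:-1].
-- intended difference: On non-G commands whose last token also occurs earlier (and the tokens from that earlier occurrence to the end are not all identical), A's parts.remove(parts[-1]) deletes the FIRST occurrence of the last token instead of the trailing token; B joins parts[:-1], which is the intended 'drop the last field' behaviour. — e.g. on sort_command_parameters(["a b a"]): A returns ["b a"], B returns ["a b"]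
import Mathlib
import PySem

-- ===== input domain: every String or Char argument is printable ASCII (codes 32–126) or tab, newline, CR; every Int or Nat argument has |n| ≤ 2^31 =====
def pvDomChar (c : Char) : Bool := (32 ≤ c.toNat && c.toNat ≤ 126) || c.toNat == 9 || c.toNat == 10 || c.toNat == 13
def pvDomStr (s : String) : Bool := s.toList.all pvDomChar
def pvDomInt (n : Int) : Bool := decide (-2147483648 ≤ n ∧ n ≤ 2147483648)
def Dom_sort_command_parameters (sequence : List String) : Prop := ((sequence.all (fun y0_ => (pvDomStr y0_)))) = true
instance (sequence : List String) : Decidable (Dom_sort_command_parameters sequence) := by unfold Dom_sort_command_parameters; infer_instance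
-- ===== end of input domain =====

-- B replaces A's classify-into-a-dict pass by a per-axis scan keeping the last match (no dict),
-- and drops the trailing token with parts[:-1] in the else branch; objective: simpler.
-- Intended difference (D_): where A's parts.remove(parts[-1]) deletes an EARLIER duplicate of the
-- last token, B drops the trailing token itself.

-- ===== PORT A =====
-- the body of A's `for part in parts` elif chain
def aClassify (params : PySem.Dict String (Option String)) (part : String) : PySem.Dict String (Option String) :=
  if PySem.Str.startswith part "X" then params.insert "X" (some part)
  else if PySem.Str.startswith part "Y" then params.insert "Y" (some part)
  else if PySem.Str.startswith part "Z" then params.insert "Z" (some part)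
  else if PySem.Str.startswith part "E" then params.insert "E" (some part)
  else if PySem.Str.startswith part "F" then params.insert "F" (some part)
  else params

-- A's loop body for one command (the string appended to sorted_sequence)
def aProcess (command : String) : String :=
  let parts := PySem.Str.split₀ command
  if parts.any (fun part => PySem.Str.startswith part "G") then
    let params := (parts.foldl aClassify
      (PySem.Dict.ofList [("X", none), ("Y", none), ("Z", none), ("E", none), ("F", none)]))
    PySem.Str.join " " (["X", "Y", "Z", "E", "F"].filterMap (fun param => params.getD param none))
  else
    -- parts.remove(parts[-1]): parts[-1] raises IndexError on empty parts (excluded by Pre_)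
    PySem.Str.join " " ((PySem.List.remove? parts (PySem.List.pyGetD parts (-1) "")).getD [])

def sort_command_parameters (sequence : List String) : List String :=
  sequence.foldl (fun sorted_sequence command => sorted_sequence ++ [aProcess command]) []

-- ===== PORT B =====
-- last part of `parts` starting with `axis` (None if no part matches)
def bLast (axis : String) (parts : List String) : Option String :=
  parts.foldl (fun last part => if PySem.Str.startswith part axis then some part else last) none

-- B's loop body for one command
def bProcess (command : String) : String :=
  let parts := PySem.Str.split₀ command
  if parts.any (fun part => PySem.Str.startswith part "G") then
    PySem.Str.join " " (["X", "Y", "Z", "E", "F"].foldl (fun kept axis =>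
      match bLast axis parts with
      | some p => kept ++ [p]
      | none => kept) [])
  else
    -- parts[:-1]
    PySem.Str.join " " (PySem.List.slice parts none (some (-1)))

def sort_command_parameters_alt (sequence : List String) : List String :=
  sequence.foldl (fun sorted_sequence command => sorted_sequence ++ [bProcess command]) []

-- ===== PRECONDITION & SPEC =====
-- A raises IndexError at parts[-1] exactly when a command splits into no parts (all-whitespace command); only those inputs are excluded.
def Pre_sort_command_parameters (sequence : List String) : Prop :=
  ∀ command ∈ sequence, PySem.Str.split₀ command ≠ []
instance (sequence : List String) : Decidable (Pre_sort_command_parameters sequence) := by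
  unfold Pre_sort_command_parameters; infer_instance

def pvWitness_sort_command_parameters : List String := ["G1 Z0.3 X1.2 F1500", "M104 S0"]

-- On non-G commands whose last token also occurs earlier (with the tokens from that earlier
-- occurrence to the end not all identical), A removes the FIRST occurrence of the last token;
-- B drops the trailing token, the intended behaviour.
def D_sort_command_parameters (sequence : List String) : Prop :=
  ∃ command ∈ sequence,
    PySem.Str.split₀ command ≠ [] ∧
    (PySem.Str.split₀ command).any (fun part => PySem.Str.startswith part "G") = false ∧
    (PySem.Str.split₀ command).erase ((PySem.Str.split₀ command).getLastD "")
      ≠ (PySem.Str.split₀ command).dropLast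
instance (sequence : List String) : Decidable (D_sort_command_parameters sequence) := by
  unfold D_sort_command_parameters; infer_instance

def Spec_sort_command_parameters (sequence : List String) (out : List String) : Prop :=
  ¬ D_sort_command_parameters sequence → out = sort_command_parameters_alt sequence
instance (sequence : List String) (out : List String) : Decidable (Spec_sort_command_parameters sequence out) := by unfold Spec_sort_command_parameters; infer_instance

def pvDiffWitness_sort_command_parameters : List String := ["a b a"]
def pvDiffWitnessOut_sort_command_parameters : (List String) × (List String) := (["b a"], ["a b"])

-- ===== CLAIM =====
def Claim_unchanged_sort_command_parameters : Prop := ∀ (sequence : List String), Dom_sort_command_parameters sequence → Pre_sort_command_parameters sequence → Spec_sort_command_parameters sequence (sort_command_parameters sequence)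
def Claim_exact_sort_command_parameters : Prop := ∀ (sequence : List String), Dom_sort_command_parameters sequence → Pre_sort_command_parameters sequence → D_sort_command_parameters sequence → sort_command_parameters sequence ≠ sort_command_parameters_alt sequence
def Claim_changed_sort_command_parameters : Prop := Dom_sort_command_parameters (pvDiffWitness_sort_command_parameters) ∧ Pre_sort_command_parameters (pvDiffWitness_sort_command_parameters) ∧ D_sort_command_parameters (pvDiffWitness_sort_command_parameters) ∧ sort_command_parameters (pvDiffWitness_sort_command_parameters) = pvDiffWitnessOut_sort_command_parameters.1 ∧ sort_command_parameters_alt (pvDiffWitness_sort_command_parameters) = pvDiffWitnessOut_sort_command_parameters.2 ∧ pvDiffWitnessOut_sort_command_parameters.1 ≠ pvDiffWitnessOut_sort_command_parameters.2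

-- ===== LEMMAS AND PROOFS =====

-- a list of characters cannot start with two distinct single characters
lemma sw_excl {l : List Char} {a b : Char} (hne : a ≠ b)
    (h : PySem.Chars.startswith l [a] = true) :
    PySem.Chars.startswith l [b] = false := by
  rw [PySem.Chars.startswith_iff] at h
  rw [Bool.eq_false_iff, Ne, PySem.Chars.startswith_iff]
  obtain ⟨t, ht⟩ := h
  intro hb
  obtain ⟨u, hu⟩ := hb
  rw [← ht] at hu
  simp at hu
  exact hne hu.1.symm

lemma swXY {l : List Char} (h : PySem.Chars.startswith l ['X'] = true) : PySem.Chars.startswith l ['Y'] = false := sw_excl (by decide) h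
lemma swXZ {l : List Char} (h : PySem.Chars.startswith l ['X'] = true) : PySem.Chars.startswith l ['Z'] = false := sw_excl (by decide) h
lemma swXE {l : List Char} (h : PySem.Chars.startswith l ['X'] = true) : PySem.Chars.startswith l ['E'] = false := sw_excl (by decide) h
lemma swXF {l : List Char} (h : PySem.Chars.startswith l ['X'] = true) : PySem.Chars.startswith l ['F'] = false := sw_excl (by decide) h
lemma swYZ {l : List Char} (h : PySem.Chars.startswith l ['Y'] = true) : PySem.Chars.startswith l ['Z'] = false := sw_excl (by decide) h
lemma swYE {l : List Char} (h : PySem.Chars.startswith l ['Y'] = true) : PySem.Chars.startswith l ['E'] = false := sw_excl (by decide) h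
lemma swYF {l : List Char} (h : PySem.Chars.startswith l ['Y'] = true) : PySem.Chars.startswith l ['F'] = false := sw_excl (by decide) h
lemma swZE {l : List Char} (h : PySem.Chars.startswith l ['Z'] = true) : PySem.Chars.startswith l ['E'] = false := sw_excl (by decide) h
lemma swZF {l : List Char} (h : PySem.Chars.startswith l ['Z'] = true) : PySem.Chars.startswith l ['F'] = false := sw_excl (by decide) h
lemma swEF {l : List Char} (h : PySem.Chars.startswith l ['E'] = true) : PySem.Chars.startswith l ['F'] = false := sw_excl (by decide) h

-- one classify step, viewed at an axis key
lemma step_getD (d : PySem.Dict String (Option String)) (p k : String)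
    (hk : k = "X" ∨ k = "Y" ∨ k = "Z" ∨ k = "E" ∨ k = "F") :
    (aClassify d p).getD k none = if PySem.Str.startswith p k then some p else d.getD k none := by
  unfold aClassify
  rcases hk with rfl | rfl | rfl | rfl | rfl <;>
    split_ifs <;>
    simp_all [PySem.Dict.getD_insert, swXY, swXZ, swXE, swXF, swYZ, swYE, swYF,
      swZE, swZF, swEF]

-- A's dict entry for an axis key after the classify loop is B's last-match fold
lemma classify_getD (parts : List String) : ∀ (d : PySem.Dict String (Option String)) (k : String),
    k = "X" ∨ k = "Y" ∨ k = "Z" ∨ k = "E" ∨ k = "F" →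
    (parts.foldl aClassify d).getD k none
      = parts.foldl (fun last part => if PySem.Str.startswith part k then some part else last) (d.getD k none) := by
  induction parts with
  | nil => intro d k hk; rfl
  | cons p rest ih =>
    intro d k hk
    simp only [List.foldl_cons]
    rw [ih _ k hk, step_getD d p k hk]

-- B's append-if-some fold is a filterMap
lemma foldl_match_filterMap (ks : List String) (g : String → Option String) :
    ∀ acc : List String,
    ks.foldl (fun kept axis => match g axis with | some p => kept ++ [p] | none => kept) acc
      = acc ++ ks.filterMap g := by
  induction ks with
  | nil => intro acc; simp
  | cons k rest ih =>
    intro acc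
    simp only [List.foldl_cons, List.filterMap_cons]
    cases hg : g k <;> simp [ih]

-- per-command equality outside the change region
lemma process_eq (command : String) (h : PySem.Str.split₀ command ≠ [])
    (hnb : (PySem.Str.split₀ command).any (fun part => PySem.Str.startswith part "G") = false →
      (PySem.Str.split₀ command).erase ((PySem.Str.split₀ command).getLastD "")
        = (PySem.Str.split₀ command).dropLast) :
    aProcess command = bProcess command := by
  unfold aProcess bProcess
  by_cases hg : (PySem.Str.split₀ command).any (fun part => PySem.Str.startswith part "G")
  · simp only [hg, if_pos]
    congr 1
    rw [foldl_match_filterMap]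
    simp only [List.nil_append]
    unfold bLast
    simp only [List.filterMap]
    rw [classify_getD _ _ "X" (by simp), classify_getD _ _ "Y" (by simp),
        classify_getD _ _ "Z" (by simp), classify_getD _ _ "E" (by simp),
        classify_getD _ _ "F" (by simp)]
    rfl
  · simp only [hg, if_neg, Bool.false_eq_true, not_false_iff]
    congr 1
    have hgf : (PySem.Str.split₀ command).any (fun part => PySem.Str.startswith part "G") = false := by
      simpa using hg
    have hv : PySem.List.pyGetD (PySem.Str.split₀ command) (-1) "" = (PySem.Str.split₀ command).getLast h :=
      PySem.List.pyGetD_neg_one _ "" h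
    have hvd : (PySem.Str.split₀ command).getLastD "" = (PySem.Str.split₀ command).getLast h := by
      rw [List.getLastD_eq_getLast?, List.getLast?_eq_some_getLast h, Option.getD_some]
    rw [hv, PySem.List.remove?_eq_some_erase _ _ (List.getLast_mem h), Option.getD_some,
        PySem.List.slice_to_neg_one, ← hvd, hnb hgf]

-- a word token: nonempty and without the space character
def Tok (t : List Char) : Prop := t ≠ [] ∧ ' ' ∉ t

-- every token produced by split₀.go is nonempty and space-free
lemma go_tokens (s : List Char) : ∀ (cur : List Char) (acc : List (List Char)),
    (∀ t ∈ acc, t ≠ [] ∧ ∀ c ∈ t, PySem.Chars.isspace c = false) →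
    (∀ c ∈ cur, PySem.Chars.isspace c = false) →
    ∀ t ∈ PySem.Chars.split₀.go s cur acc, t ≠ [] ∧ ∀ c ∈ t, PySem.Chars.isspace c = false := by
  induction s with
  | nil =>
    intro cur acc hacc hcur t ht
    unfold PySem.Chars.split₀.go at ht
    by_cases hce : cur.isEmpty
    · simp only [hce, if_pos, List.mem_reverse] at ht
      exact hacc t ht
    · simp only [hce, if_neg, Bool.false_eq_true, not_false_iff, List.mem_reverse,
        List.mem_cons] at ht
      rcases ht with rfl | ht
      · refine ⟨by simpa [List.isEmpty_iff] using hce, fun c hcm => hcur c (by simpa using hcm)⟩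
      · exact hacc t ht
  | cons c rest ih =>
    intro cur acc hacc hcur t ht
    unfold PySem.Chars.split₀.go at ht
    by_cases hs : PySem.Chars.isspace c
    · simp only [hs, if_pos] at ht
      by_cases hce : cur.isEmpty
      · simp only [hce, if_pos] at ht
        exact ih [] acc hacc (by simp) t ht
      · simp only [hce, if_neg, Bool.false_eq_true, not_false_iff] at ht
        refine ih [] (cur.reverse :: acc) ?_ (by simp) t ht
        intro u hu
        rcases List.mem_cons.1 hu with rfl | hu
        · exact ⟨by simpa [List.isEmpty_iff] using hce, fun d hd => hcur d (by simpa using hd)⟩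
        · exact hacc u hu
    · simp only [hs, if_neg, Bool.false_eq_true, not_false_iff] at ht
      refine ih (c :: cur) acc hacc ?_ t ht
      intro d hd
      rcases List.mem_cons.1 hd with rfl | hd
      · simpa using hs
      · exact hcur d hd

-- tokens of split₀ are nonempty and space-free
lemma split₀_tok (s : String) : ∀ w ∈ PySem.Str.split₀ s, Tok w.toList := by
  intro w hw
  unfold PySem.Str.split₀ at hw
  rcases List.mem_map.1 hw with ⟨t, ht, rfl⟩
  unfold PySem.Chars.split₀ at ht
  have := go_tokens s.toList [] [] (by simp) (by simp) t ht
  rw [String.toList_ofList]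
  refine ⟨this.1, fun hmem => ?_⟩
  have := this.2 ' ' hmem
  simp [show PySem.Chars.isspace ' ' = true from by decide] at this

-- cancelling space-free prefixes of strings whose tails are empty or start with a space
lemma append_cancel_tok : ∀ (a b x y : List Char), ' ' ∉ a → ' ' ∉ b →
    (x = [] ∨ ∃ u, x = ' ' :: u) → (y = [] ∨ ∃ u, y = ' ' :: u) →
    a ++ x = b ++ y → a = b ∧ x = y := by
  intro a
  induction a with
  | nil =>
    intro b x y _ hb hx hy h
    cases b with
    | nil => exact ⟨rfl, h⟩
    | cons d b' =>
      exfalso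
      rcases hx with rfl | ⟨u, rfl⟩
      · simp at h
      · simp at h
        exact hb (h.1 ▸ List.mem_cons_self)
  | cons c a' ih =>
    intro b x y ha hb hx hy h
    cases b with
    | nil =>
      exfalso
      rcases hy with rfl | ⟨u, rfl⟩
      · simp at h
      · simp at h
        exact ha (h.1 ▸ List.mem_cons_self)
    | cons d b' =>
      simp only [List.cons_append, List.cons.injEq] at h
      obtain ⟨rfl, h2⟩ := h
      obtain ⟨h3, h4⟩ := ih b' x y (fun hm => ha (List.mem_cons_of_mem _ hm))
        (fun hm => hb (List.mem_cons_of_mem _ hm)) hx hy h2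
      exact ⟨by rw [h3], h4⟩

-- intercalate with a single space is injective on lists of tokens
lemma inter_cons (a : List Char) (l : List (List Char)) :
    [' '].intercalate (a :: l) = a ++ (if l = [] then [] else ' ' :: [' '].intercalate l) := by
  cases l with
  | nil => simp [List.intercalate]
  | cons b t =>
    simp [List.intercalate, List.intersperse]

lemma inter_inj : ∀ (l₁ l₂ : List (List Char)), (∀ t ∈ l₁, Tok t) → (∀ t ∈ l₂, Tok t) →
    [' '].intercalate l₁ = [' '].intercalate l₂ → l₁ = l₂ := by
  intro l₁
  induction l₁ with
  | nil =>
    intro l₂ _ h₂ h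
    cases l₂ with
    | nil => rfl
    | cons b t =>
      exfalso
      rw [show [' '].intercalate ([] : List (List Char)) = [] from rfl, inter_cons] at h
      rcases List.append_eq_nil_iff.1 h.symm with ⟨hb, _⟩
      exact (h₂ b List.mem_cons_self).1 hb
  | cons a l₁' ih =>
    intro l₂ h₁ h₂ h
    cases l₂ with
    | nil =>
      exfalso
      rw [show [' '].intercalate ([] : List (List Char)) = [] from rfl, inter_cons] at h
      rcases List.append_eq_nil_iff.1 h with ⟨hb, _⟩
      exact (h₁ a List.mem_cons_self).1 hb
    | cons b l₂' =>
      rw [inter_cons, inter_cons] at h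
      obtain ⟨hab, ht⟩ := append_cancel_tok a b _ _
        (h₁ a List.mem_cons_self).2 (h₂ b List.mem_cons_self).2
        (by split_ifs with h0 <;> [exact Or.inl rfl; exact Or.inr ⟨_, rfl⟩])
        (by split_ifs with h0 <;> [exact Or.inl rfl; exact Or.inr ⟨_, rfl⟩]) h
      subst hab
      by_cases h1 : l₁' = [] <;> by_cases h2 : l₂' = []
      · rw [h1, h2]
      · simp [h1, h2] at ht
      · simp [h1, h2] at ht
      · simp only [h1, h2] at ht
        have ht' := (List.cons_injective).eq_iff.1 ht
        rw [ih l₂' (fun t htm => h₁ t (List.mem_cons_of_mem _ htm))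
          (fun t htm => h₂ t (List.mem_cons_of_mem _ htm)) ht']

-- joining with " " is injective on lists of split₀ tokens
lemma join_inj (L₁ L₂ : List String)
    (h₁ : ∀ w ∈ L₁, Tok w.toList) (h₂ : ∀ w ∈ L₂, Tok w.toList)
    (h : PySem.Str.join " " L₁ = PySem.Str.join " " L₂) : L₁ = L₂ := by
  unfold PySem.Str.join PySem.Chars.join at h
  have h' := congrArg String.toList h
  simp only [String.toList_ofList] at h'
  have hsep : " ".toList = [' '] := by decide
  rw [hsep] at h'
  have := inter_inj (L₁.map String.toList) (L₂.map String.toList)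
    (fun t htm => by rcases List.mem_map.1 htm with ⟨w, hw, rfl⟩; exact h₁ w hw)
    (fun t htm => by rcases List.mem_map.1 htm with ⟨w, hw, rfl⟩; exact h₂ w hw) h'
  have hinj : Function.Injective String.toList := fun u v huv => by
    rw [← String.ofList_toList (s := u), ← String.ofList_toList (s := v), huv]
  exact List.map_injective_iff.2 hinj this

-- inside D_, the two per-command results really differ
lemma process_ne (command : String) (h : PySem.Str.split₀ command ≠ [])
    (hgf : (PySem.Str.split₀ command).any (fun part => PySem.Str.startswith part "G") = false)
    (hne : (PySem.Str.split₀ command).erase ((PySem.Str.split₀ command).getLastD "")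
      ≠ (PySem.Str.split₀ command).dropLast) :
    aProcess command ≠ bProcess command := by
  unfold aProcess bProcess
  simp only [hgf, Bool.false_eq_true, if_false]
  intro heq
  have hv : PySem.List.pyGetD (PySem.Str.split₀ command) (-1) "" = (PySem.Str.split₀ command).getLast h :=
    PySem.List.pyGetD_neg_one _ "" h
  have hvd : (PySem.Str.split₀ command).getLastD "" = (PySem.Str.split₀ command).getLast h := by
    rw [List.getLastD_eq_getLast?, List.getLast?_eq_some_getLast h, Option.getD_some]
  rw [hv, PySem.List.remove?_eq_some_erase _ _ (List.getLast_mem h), Option.getD_some,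
      PySem.List.slice_to_neg_one] at heq
  apply hne
  rw [hvd]
  refine join_inj _ _ ?_ ?_ heq
  · exact fun w hw => split₀_tok command w (List.erase_subset hw)
  · exact fun w hw => split₀_tok command w (List.dropLast_subset _ hw)

-- ===== VERDICT =====
theorem sort_command_parameters_spec : Claim_unchanged_sort_command_parameters := by
  intro sequence _ hpre
  unfold Spec_sort_command_parameters
  intro hnd
  unfold sort_command_parameters sort_command_parameters_alt
  rw [PySem.List.foldl_append_singleton_eq_map, PySem.List.foldl_append_singleton_eq_map]
  simp only [List.nil_append]
  refine List.map_congr_left (fun c hc => process_eq c (hpre c hc) ?_)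
  intro hgf
  by_contra hne
  exact hnd ⟨c, hc, hpre c hc, hgf, hne⟩

theorem sort_command_parameters_changed : Claim_changed_sort_command_parameters := by
  unfold Claim_changed_sort_command_parameters; decide

theorem sort_command_parameters_tight : Claim_exact_sort_command_parameters := by
  intro sequence _ hpre hd heq
  obtain ⟨c, hc, h0, hgf, hne⟩ := hd
  unfold sort_command_parameters sort_command_parameters_alt at heq
  rw [PySem.List.foldl_append_singleton_eq_map, PySem.List.foldl_append_singleton_eq_map] at heq
  simp only [List.nil_append] at heq
  exact process_ne c h0 hgf hne (List.map_eq_map_iff.1 heq c hc)
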